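-- pv_equiv track=rewrite | github.com/keshri23jayesh/coding | binary_search/bs-11._find_the_nth_root_of_an_integer.py | is_nth_root
-- ===== SOURCE A (Python) =====
-- def is_nth_root(N, M, mid):
--     ans = 1
--     for i in range(1, M+1):
--         ans *= mid
--     if ans == N:
--         return 1
--     if ans > N:
--         return 2
--     if ans < N:
--         return 3
-- ===== SOURCE B (Python) =====
-- def is_nth_root(N, M, mid):
--     # exponentiation by squaring instead of A's M-step multiplication loop
--     ans = 1
--     base = mid
--     e = M
--     while e > 0:
--         if e % 2 == 1:
--             ans *= base
--         base *= base
--         e //= 2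
--     if ans == N:
--         return 1
--     if ans > N:
--         return 2
--     return 3
-- ===== Notes on version B (the rewrite author's own statement) =====
-- stated objective: faster
-- what changed: Replaces the M-iteration multiplication loop by exponentiation by squaring before the same three-way comparison with N.
import Mathlib
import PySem

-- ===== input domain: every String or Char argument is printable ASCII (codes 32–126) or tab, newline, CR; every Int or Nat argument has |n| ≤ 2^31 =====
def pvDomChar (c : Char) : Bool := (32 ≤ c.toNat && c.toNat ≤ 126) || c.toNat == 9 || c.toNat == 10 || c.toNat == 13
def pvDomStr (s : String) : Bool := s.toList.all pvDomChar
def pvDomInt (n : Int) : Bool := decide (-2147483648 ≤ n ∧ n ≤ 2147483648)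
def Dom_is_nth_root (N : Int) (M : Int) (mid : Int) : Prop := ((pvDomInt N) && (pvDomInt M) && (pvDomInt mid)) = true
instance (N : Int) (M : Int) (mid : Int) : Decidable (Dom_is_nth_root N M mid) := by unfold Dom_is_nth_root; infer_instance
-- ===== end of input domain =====

-- B replaces A's M-step multiplication loop by exponentiation by squaring (faster, asymptotic).

-- ===== PORT A =====
def is_nth_root (N : Int) (M : Int) (mid : Int) : Int :=
  let ans := (PySem.List.pyRange 1 (M + 1) 1).foldl (fun ans _ => ans * mid) 1
  if ans = N then 1
  else if ans > N then 2
  -- Python's last branch is 'if ans < N: return 3'; by trichotomy it always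
  -- fires here, so the implicit 'return None' fall-through is unreachable.
  else 3

-- ===== PORT B =====
def fastPow (e : Int) (base : Int) (ans : Int) : Int :=
  if h : 0 < e then
    fastPow (PySem.Int.floordiv e 2) (base * base)
      (if PySem.Int.mod e 2 = 1 then ans * base else ans)
  else ans
termination_by e.toNat
decreasing_by
  have h2 : PySem.Int.floordiv e 2 = e / 2 := PySem.Int.floordiv_eq_ediv_of_pos (by omega)
  rw [h2]; omega

def is_nth_root_alt (N : Int) (M : Int) (mid : Int) : Int :=
  let ans := fastPow M mid 1
  if ans = N then 1
  else if ans > N then 2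
  else 3

-- ===== PRECONDITION & SPEC =====
def Spec_is_nth_root (N : Int) (M : Int) (mid : Int) (out : Int) : Prop := out = is_nth_root_alt N M mid
instance (N : Int) (M : Int) (mid : Int) (out : Int) : Decidable (Spec_is_nth_root N M mid out) := by unfold Spec_is_nth_root; infer_instance

-- ===== CLAIM (what is proved, stated in full; the proofs are below) =====
def Claim_equal_is_nth_root : Prop := ∀ (N : Int) (M : Int) (mid : Int), Dom_is_nth_root N M mid → Spec_is_nth_root N M mid (is_nth_root N M mid)

-- ===== LEMMAS AND PROOFS =====

-- A's loop multiplies the accumulator by `mid` once per list element.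
lemma foldl_mul_const (mid : Int) : ∀ (l : List Int) (a : Int),
    l.foldl (fun x _ => x * mid) a = a * mid ^ l.length := by
  intro l
  induction l with
  | nil => intro a; simp
  | cons x xs ih =>
      intro a
      simp [List.foldl, ih, pow_succ]
      ring

-- A's accumulator equals mid ^ M.toNat.
lemma ansA_eq (M mid : Int) :
    (PySem.List.pyRange 1 (M + 1) 1).foldl (fun ans _ => ans * mid) 1 = mid ^ M.toNat := by
  rw [foldl_mul_const, PySem.List.length_pyRange_one]
  simp

-- Exponentiation by squaring computes ans * base ^ e.toNat.
lemma fastPow_eq (e base ans : Int) : fastPow e base ans = ans * base ^ e.toNat := by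
  fun_induction fastPow with
  | case1 e base ans h ih =>
      have hd : PySem.Int.floordiv e 2 = e / 2 := PySem.Int.floordiv_eq_ediv_of_pos (by omega)
      have hm : PySem.Int.mod e 2 = e % 2 := PySem.Int.mod_eq_emod_of_pos (by omega)
      have hk : (e / 2).toNat = e.toNat / 2 := by omega
      simp only [dite_eq_ite] at ih
      rw [ih, hd, hm, hk]
      have h2 : e.toNat = 2 * (e.toNat / 2) + e.toNat % 2 := by omega
      by_cases hodd : e % 2 = 1
      · have : e.toNat % 2 = 1 := by omega
        rw [if_pos hodd]
        calc ans * base * (base * base) ^ (e.toNat / 2)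
            = ans * (base ^ (2 * (e.toNat / 2)) * base) := by
              rw [two_mul, pow_add, ← mul_pow]; ring
          _ = ans * base ^ e.toNat := by
              rw [← pow_succ]
              have hx : 2 * (e.toNat / 2) + 1 = e.toNat := by omega
              rw [hx]
      · have he : e % 2 = 0 := by omega
        have : e.toNat % 2 = 0 := by omega
        rw [if_neg hodd]
        calc ans * (base * base) ^ (e.toNat / 2)
            = ans * base ^ (2 * (e.toNat / 2)) := by rw [two_mul, pow_add, ← mul_pow]
          _ = ans * base ^ e.toNat := by
              have hx : 2 * (e.toNat / 2) = e.toNat := by omega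
              rw [hx]
  | case2 e base ans h =>
      have : e.toNat = 0 := by omega
      simp [this]

-- ===== VERDICT (by name: the statement is the Claim_ definition above) =====
theorem is_nth_root_spec : Claim_equal_is_nth_root := by
  intro N M mid _
  unfold Spec_is_nth_root is_nth_root is_nth_root_alt
  rw [ansA_eq, fastPow_eq, one_mul]
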